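-- pv_equiv track=rewrite | github.com/Pavan-dev0/LeetCode_Logic_Training | Python/Arrays/Mirror_Frequency_Distance.py | mirrorFrequency
-- ===== SOURCE A (Python) =====
-- from collections import Counter
--
-- def mirrorFrequency(s: str) -> int:
--     def mirror(c):
--         if c.isdigit():
--             return chr(ord('9')-(ord(c)-ord('0')))
--         else:
--             return chr(ord('z')-(ord(c)-ord('a')))
--
--     freq=Counter(s)
--     visited=set()
--
--     ans=0
--
--     for c in freq:
--         if c in visited:
--             continue
--
--         m=mirror(c)
--
--         ans+=abs(freq[c]-freq.get(m,0))
--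
--         visited.add(c)
--         visited.add(m)
--
--     return ans
-- ===== SOURCE B (Python) =====
-- def mirrorFrequency(s: str) -> int:
--     def mirror(c):
--         if c.isdigit():
--             return chr(ord('9')-(ord(c)-ord('0')))
--         else:
--             return chr(ord('z')-(ord(c)-ord('a')))
--
--     # one pass over the string: accumulate a SIGNED difference per unordered
--     # mirror pair (keyed by the sorted pair), then sum absolute values.
--     diff = {}
--     for c in s:
--         m = mirror(c)
--         key = (c, m) if c < m else (m, c)
--         diff[key] = diff.get(key, 0) + (1 if c < m else -1)
--     return sum(abs(v) for v in diff.values())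
-- ===== Notes on version B (the rewrite author's own statement) =====
-- stated objective: alternative
-- what changed: Instead of building a Counter and walking its keys with a visited set, B makes a single pass over the raw string accumulating a signed count difference per unordered mirror pair in a pair-keyed dict, then sums the absolute values of that dict's entries.
import Mathlib
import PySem

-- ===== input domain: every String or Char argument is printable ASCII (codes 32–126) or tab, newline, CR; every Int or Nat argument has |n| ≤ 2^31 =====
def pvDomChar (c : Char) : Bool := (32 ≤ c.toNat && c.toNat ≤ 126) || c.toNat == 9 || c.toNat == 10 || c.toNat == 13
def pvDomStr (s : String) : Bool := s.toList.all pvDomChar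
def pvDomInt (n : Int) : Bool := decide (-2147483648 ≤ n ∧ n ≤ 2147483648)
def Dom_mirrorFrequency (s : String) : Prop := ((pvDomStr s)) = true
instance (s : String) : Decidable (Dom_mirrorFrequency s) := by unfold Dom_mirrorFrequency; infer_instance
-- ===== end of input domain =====

-- B replaces A's Counter-plus-visited-set walk by a single pass over the raw string that
-- accumulates a signed count difference per unordered mirror pair, then sums absolute values.

-- ===== PORT A =====
-- single-char c.isdigit(); exact on the ASCII domain Dom (Python's isdigit is exactly '0'..'9' there)
def pyIsDigit (c : Char) : Bool := 48 ≤ c.toNat && c.toNat ≤ 57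
-- chr(ord('9')-(ord(c)-ord('0'))) / chr(ord('z')-(ord(c)-ord('a'))); arithmetic in Int as Python does
def pyMirror (c : Char) : Char :=
  if pyIsDigit c then Char.ofNat (Int.toNat (57 - ((c.toNat : Int) - 48)))
  else Char.ofNat (Int.toNat (122 - ((c.toNat : Int) - 97)))

def mirrorFrequency (s : String) : Int :=
  let freq := PySem.Dict.counter s.toList
  (freq.keys.foldl
    (fun (st : PySem.Set Char × Int) c =>
      if PySem.Set.contains st.1 c then st
      else
        let m := pyMirror c
        (PySem.Set.add (PySem.Set.add st.1 c) m,
         st.2 + |freq.getD c 0 - freq.getD m 0|))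
    (PySem.Set.empty, 0)).2

-- ===== PORT B =====
-- key = (c, m) if c < m else (m, c)
def pvKey (c : Char) : Char × Char :=
  let m := pyMirror c
  if c < m then (c, m) else (m, c)

def mirrorFrequency_alt (s : String) : Int :=
  let diff := s.toList.foldl
    (fun (d : PySem.Dict (Char × Char) Int) c =>
      d.insert (pvKey c) (d.getD (pvKey c) 0 + (if c < pyMirror c then 1 else -1)))
    PySem.Dict.empty
  diff.values.foldl (fun a v => a + |v|) 0

-- ===== PRECONDITION & SPEC =====
def Spec_mirrorFrequency (s : String) (out : Int) : Prop := out = mirrorFrequency_alt s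
instance (s : String) (out : Int) : Decidable (Spec_mirrorFrequency s out) := by unfold Spec_mirrorFrequency; infer_instance

-- ===== CLAIM (what is proved, stated in full; the proofs are below) =====
def Claim_equal_mirrorFrequency : Prop := ∀ (s : String), Dom_mirrorFrequency s → Spec_mirrorFrequency s (mirrorFrequency s)

-- ===== LEMMAS AND PROOFS =====

-- mirror is an involution and fixpoint-free on characters of the domain (checked by computation)
theorem pyMirror_ofNat_invol : ∀ n, n < 127 → pyMirror (pyMirror (Char.ofNat n)) = Char.ofNat n := by decide
theorem pyMirror_ofNat_ne : ∀ n, n < 127 → pyMirror (Char.ofNat n) ≠ Char.ofNat n := by decide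

theorem pyMirror_invol {c : Char} (h : c.toNat ≤ 126) : pyMirror (pyMirror c) = c := by
  have := pyMirror_ofNat_invol c.toNat (by omega)
  rwa [Char.ofNat_toNat] at this

theorem pyMirror_ne {c : Char} (h : c.toNat ≤ 126) : pyMirror c ≠ c := by
  have := pyMirror_ofNat_ne c.toNat (by omega)
  rwa [Char.ofNat_toNat] at this

-- canonical representative of the unordered pair {c, mirror c}
def canon (c : Char) : Char := min c (pyMirror c)

theorem canon_cases (c : Char) : canon c = c ∨ canon c = pyMirror c := min_choice _ _

theorem canon_pyMirror {c : Char} (h : c.toNat ≤ 126) : canon (pyMirror c) = canon c := by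
  unfold canon
  rw [pyMirror_invol h, min_comm]

theorem canon_eq_cases {c d : Char} (hc : c.toNat ≤ 126) (hd : d.toNat ≤ 126)
    (h : canon c = canon d) : d = c ∨ d = pyMirror c := by
  rcases canon_cases d with h1 | h1 <;> rcases canon_cases c with h2 | h2
  · left; rw [← h1, ← h, h2]
  · right; rw [← h1, ← h, h2]
  · right
    have h3 : pyMirror d = c := by rw [← h1, ← h, h2]
    have h4 := congrArg pyMirror h3
    rwa [pyMirror_invol hd] at h4
  · left
    have h3 : pyMirror d = pyMirror c := by rw [← h1, ← h, h2]
    have h4 := congrArg pyMirror h3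
    rwa [pyMirror_invol hd, pyMirror_invol hc] at h4

theorem canon_toNat_le (c : Char) : (canon c).toNat ≤ c.toNat := by
  have h : canon c ≤ c := min_le_left _ _
  rw [Char.le_def] at h
  exact h

theorem canon_ofNat_idem : ∀ n, n < 127 → canon (canon (Char.ofNat n)) = canon (Char.ofNat n) := by decide

theorem canon_idem {c : Char} (h : c.toNat ≤ 126) : canon (canon c) = canon c := by
  have := canon_ofNat_idem c.toNat (by omega)
  rwa [Char.ofNat_toNat] at this

-- pvKey factors through canon: pvKey c = (canon c, pyMirror (canon c))
theorem pvKey_ofNat_eq : ∀ n, n < 127 →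
    pvKey (Char.ofNat n) = (canon (Char.ofNat n), pyMirror (canon (Char.ofNat n))) := by decide

theorem pvKey_eq {c : Char} (h : c.toNat ≤ 126) :
    pvKey c = (canon c, pyMirror (canon c)) := by
  have := pvKey_ofNat_eq c.toNat (by omega)
  rwa [Char.ofNat_toNat] at this

-- canon d = d → d < pyMirror d (on the domain)
theorem canon_lt_pyMirror {d : Char} (h : d.toNat ≤ 126) (hd : canon d = d) :
    d < pyMirror d := by
  have hne := pyMirror_ne h
  have hle : d ≤ pyMirror d := by
    unfold canon at hd
    have := min_eq_left_iff.mp hd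
    exact this
  exact lt_of_le_of_ne hle (Ne.symm hne)

-- the list of keys that A actually processes, given visited set V
def selA : List Char → PySem.Set Char → List Char
  | [], _ => []
  | c :: t, V =>
    if PySem.Set.contains V c then selA t V
    else c :: selA t (PySem.Set.add (PySem.Set.add V c) (pyMirror c))

theorem foldA_eq (v : Char → Int) : ∀ (ks : List Char) (V : PySem.Set Char) (a : Int),
    (ks.foldl (fun (st : PySem.Set Char × Int) c =>
      if PySem.Set.contains st.1 c then st
      else (PySem.Set.add (PySem.Set.add st.1 c) (pyMirror c), st.2 + v c)) (V, a)).2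
    = a + ((selA ks V).map v).sum := by
  intro ks
  induction ks with
  | nil => intro V a; simp [selA]
  | cons c t ih =>
    intro V a
    simp only [List.foldl, selA]
    by_cases h : PySem.Set.contains V c
    · rw [if_pos h, if_pos h, ih]
    · rw [if_neg h, if_neg h, ih]
      simp [add_assoc]

theorem selA_subset : ∀ (ks : List Char) (V : PySem.Set Char) (c : Char),
    c ∈ selA ks V → c ∈ ks := by
  intro ks
  induction ks with
  | nil => intro V c h; simp [selA] at h
  | cons x t ih =>
    intro V c h
    simp only [selA] at h
    by_cases hx : PySem.Set.contains V x
    · rw [if_pos hx] at h; exact List.mem_cons_of_mem _ (ih _ _ h)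
    · rw [if_neg hx] at h
      rcases List.mem_cons.mp h with h | h
      · exact h ▸ List.mem_cons_self
      · exact List.mem_cons_of_mem _ (ih _ _ h)

theorem mem_selA_canon : ∀ (ks : List Char) (V : PySem.Set Char),
    (∀ c ∈ ks, c.toNat ≤ 126) → (∀ x ∈ V, pyMirror x ∈ V) →
    ∀ d, (d ∈ (selA ks V).map canon ↔ ∃ c, c ∈ ks ∧ c ∉ V ∧ canon c = d) := by
  intro ks
  induction ks with
  | nil => intro V _ _ d; simp [selA]
  | cons c t ih =>
    intro V hdom hmc d
    have hc126 : c.toNat ≤ 126 := hdom c List.mem_cons_self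
    have hdt : ∀ x ∈ t, x.toNat ≤ 126 := fun x hx => hdom x (List.mem_cons_of_mem _ hx)
    simp only [selA]
    by_cases h : PySem.Set.contains V c
    · rw [if_pos h, ih V hdt hmc d]
      constructor
      · rintro ⟨c', hc', hnv, he⟩
        exact ⟨c', List.mem_cons_of_mem _ hc', hnv, he⟩
      · rintro ⟨c', hc', hnv, he⟩
        rcases List.mem_cons.mp hc' with rfl | hc't
        · exact absurd ((PySem.Set.contains_iff _ _).mp h) hnv
        · exact ⟨c', hc't, hnv, he⟩
    · have hcV : c ∉ V := fun hm => h ((PySem.Set.contains_iff _ _).mpr hm)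
      have hmcV' : ∀ x ∈ PySem.Set.add (PySem.Set.add V c) (pyMirror c),
          pyMirror x ∈ PySem.Set.add (PySem.Set.add V c) (pyMirror c) := by
        intro x hx
        rcases (PySem.Set.mem_add _ _ _).mp hx with hx' | rfl
        · rcases (PySem.Set.mem_add _ _ _).mp hx' with hx'' | rfl
          · exact (PySem.Set.mem_add _ _ _).mpr (Or.inl ((PySem.Set.mem_add _ _ _).mpr (Or.inl (hmc x hx''))))
          · exact (PySem.Set.mem_add _ _ _).mpr (Or.inr rfl)
        · rw [pyMirror_invol hc126]
          exact (PySem.Set.mem_add _ _ _).mpr (Or.inl ((PySem.Set.mem_add _ _ _).mpr (Or.inr rfl)))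
      rw [if_neg h]
      simp only [List.map, List.mem_cons]
      rw [ih _ hdt hmcV' d]
      constructor
      · rintro (he | ⟨c', hc', hnv', he⟩)
        · exact ⟨c, Or.inl rfl, hcV, he.symm⟩
        · refine ⟨c', Or.inr hc', ?_, he⟩
          intro hv
          exact hnv' ((PySem.Set.mem_add _ _ _).mpr (Or.inl ((PySem.Set.mem_add _ _ _).mpr (Or.inl hv))))
      · rintro ⟨c', hc', hnv, he⟩
        rcases hc' with rfl | hc't
        · exact Or.inl he.symm
        · by_cases hv' : c' ∈ PySem.Set.add (PySem.Set.add V c) (pyMirror c)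
          · rcases (PySem.Set.mem_add _ _ _).mp hv' with hx' | rfl
            · rcases (PySem.Set.mem_add _ _ _).mp hx' with hx'' | rfl
              · exact absurd hx'' hnv
              · exact Or.inl he.symm
            · left
              rw [← he, canon_pyMirror hc126]
          · exact Or.inr ⟨c', hc't, hv', he⟩

theorem nodup_selA_canon : ∀ (ks : List Char) (V : PySem.Set Char),
    (∀ c ∈ ks, c.toNat ≤ 126) → (∀ x ∈ V, pyMirror x ∈ V) →
    ((selA ks V).map canon).Nodup := by
  intro ks
  induction ks with
  | nil => intro V _ _; simp [selA]
  | cons c t ih =>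
    intro V hdom hmc
    have hc126 : c.toNat ≤ 126 := hdom c List.mem_cons_self
    have hdt : ∀ x ∈ t, x.toNat ≤ 126 := fun x hx => hdom x (List.mem_cons_of_mem _ hx)
    simp only [selA]
    by_cases h : PySem.Set.contains V c
    · rw [if_pos h]; exact ih V hdt hmc
    · have hmcV' : ∀ x ∈ PySem.Set.add (PySem.Set.add V c) (pyMirror c),
          pyMirror x ∈ PySem.Set.add (PySem.Set.add V c) (pyMirror c) := by
        intro x hx
        rcases (PySem.Set.mem_add _ _ _).mp hx with hx' | rfl
        · rcases (PySem.Set.mem_add _ _ _).mp hx' with hx'' | rfl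
          · exact (PySem.Set.mem_add _ _ _).mpr (Or.inl ((PySem.Set.mem_add _ _ _).mpr (Or.inl (hmc x hx''))))
          · exact (PySem.Set.mem_add _ _ _).mpr (Or.inr rfl)
        · rw [pyMirror_invol hc126]
          exact (PySem.Set.mem_add _ _ _).mpr (Or.inl ((PySem.Set.mem_add _ _ _).mpr (Or.inr rfl)))
      rw [if_neg h]
      simp only [List.map, List.nodup_cons]
      refine ⟨?_, ih _ hdt hmcV'⟩
      intro hmem
      rcases (mem_selA_canon t _ hdt hmcV' (canon c)).mp hmem with ⟨c', hc't, hnv', he⟩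
      have hc'126 : c'.toNat ≤ 126 := hdt c' hc't
      rcases canon_eq_cases hc126 hc'126 he.symm with rfl | rfl
      · exact hnv' ((PySem.Set.mem_add _ _ _).mpr (Or.inl ((PySem.Set.mem_add _ _ _).mpr (Or.inr rfl))))
      · exact hnv' ((PySem.Set.mem_add _ _ _).mpr (Or.inr rfl))

-- ---- B side ----

-- contribution of one character c of the string to the dict entry at key k
def contrib (c : Char) (k : Char × Char) : Int :=
  if pvKey c = k then (if c < pyMirror c then 1 else -1) else 0

theorem foldB_getD (l : List Char) :
    ∀ (d : PySem.Dict (Char × Char) Int) (k : Char × Char),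
    (l.foldl (fun (d : PySem.Dict (Char × Char) Int) c =>
        d.insert (pvKey c) (d.getD (pvKey c) 0 + (if c < pyMirror c then 1 else -1))) d).getD k 0
      = d.getD k 0 + (l.map (fun c => contrib c k)).sum := by
  induction l with
  | nil => intro d k; simp
  | cons c t ih =>
    intro d k
    simp only [List.foldl, List.map, List.sum_cons]
    rw [ih]
    rw [PySem.Dict.getD_insert]
    unfold contrib
    by_cases h : pvKey c = k
    · rw [if_pos h.symm, if_pos h, h]; ring
    · rw [if_neg (fun he => h he.symm), if_neg h]; ring

theorem contrib_eq {c d : Char} (hc : c.toNat ≤ 126) (hd : d.toNat ≤ 126)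
    (hcanon : canon d = d) :
    contrib c (d, pyMirror d) =
      (if c = d then (1 : Int) else 0) - (if c = pyMirror d then 1 else 0) := by
  have hdlt : d < pyMirror d := canon_lt_pyMirror hd hcanon
  unfold contrib
  rw [pvKey_eq hc]
  by_cases h : canon c = d
  · rw [if_pos (by rw [h])]
    rcases canon_eq_cases hc hd (by rw [h, hcanon]) with rfl | rfl
    · rw [if_pos hdlt, if_pos rfl, if_neg (Ne.symm (pyMirror_ne hc))]
      norm_num
    · rw [pyMirror_invol hc] at hdlt ⊢
      rw [if_neg (fun hh => lt_asymm hh hdlt), if_neg (Ne.symm (pyMirror_ne hc)), if_pos rfl]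
      norm_num
  · rw [if_neg (by intro he; exact h (congrArg Prod.fst he))]
    have h1 : c ≠ d := fun he => by subst he; exact h hcanon
    have h2 : c ≠ pyMirror d := fun he => by
      subst he
      rw [canon_pyMirror hd, hcanon] at h
      exact h rfl
    rw [if_neg h1, if_neg h2]
    norm_num

theorem count_sum_ite (d : Char) (l : List Char) :
    (l.map (fun c => if c = d then (1 : Int) else 0)).sum = (l.count d : Int) := by
  induction l with
  | nil => simp
  | cons c t ih =>
    simp only [List.map, List.sum_cons, ih, List.count_cons]
    by_cases h : c = d
    · subst h; simp
      omega
    · simp [h]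

theorem sum_map_sub (f g : Char → Int) (l : List Char) :
    (l.map (fun c => f c - g c)).sum = (l.map f).sum - (l.map g).sum := by
  induction l with
  | nil => simp
  | cons c t ih =>
    simp only [List.map, List.sum_cons, ih]
    ring

theorem sum_contrib (l : List Char) (d : Char)
    (hl : ∀ c ∈ l, c.toNat ≤ 126) (hd : d.toNat ≤ 126) (hcanon : canon d = d) :
    (l.map (fun c => contrib c (d, pyMirror d))).sum
      = (l.count d : Int) - (l.count (pyMirror d) : Int) := by
  have h1 : (l.map (fun c => contrib c (d, pyMirror d))).sum
      = (l.map (fun c => (if c = d then (1 : Int) else 0) - (if c = pyMirror d then 1 else 0))).sum := by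
    apply congrArg
    apply List.map_congr_left
    intro c hc
    exact contrib_eq (hl c hc) hd hcanon
  rw [h1, sum_map_sub, count_sum_ite, count_sum_ite]


-- ===== VERDICT (by name: the statement is the Claim_ definition above) =====
theorem mirrorFrequency_spec : Claim_equal_mirrorFrequency := by
  intro s hdom
  unfold Dom_mirrorFrequency pvDomStr at hdom
  unfold Spec_mirrorFrequency
  unfold mirrorFrequency mirrorFrequency_alt
  set l := s.toList with hl
  have hdc : ∀ c ∈ l, c.toNat ≤ 126 := by
    intro c hc
    have := List.all_eq_true.mp hdom c hc
    simp only [pvDomChar, Bool.or_eq_true, Bool.and_eq_true, decide_eq_true_eq, beq_iff_eq] at this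
    omega
  set freq := PySem.Dict.counter (κ := Char) l with hfreq
  set ks := freq.keys with hks
  have hdomk : ∀ c ∈ ks, c.toNat ≤ 126 := by
    intro c hc
    rw [hks, hfreq, PySem.Dict.keys_counter] at hc
    exact hdc c ((PySem.Set.mem_ofList _ _).mp hc)
  have hmem_ks : ∀ c, c ∈ ks ↔ c ∈ l := by
    intro c
    rw [hks, hfreq, PySem.Dict.keys_counter]
    exact PySem.Set.mem_ofList _ _
  have hmcEmpty : ∀ x ∈ (PySem.Set.empty : PySem.Set Char),
      pyMirror x ∈ (PySem.Set.empty : PySem.Set Char) := by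
    intro x hx; simp [PySem.Set.empty] at hx
  set u : Char → Int := fun d => |(l.count d : Int) - (l.count (pyMirror d) : Int)| with hu
  set g : Char → Char × Char := fun d => (d, pyMirror d) with hg
  set D := l.foldl
    (fun (d : PySem.Dict (Char × Char) Int) c =>
      d.insert (pvKey c) (d.getD (pvKey c) 0 + (if c < pyMirror c then 1 else -1)))
    PySem.Dict.empty with hD
  set w : Char × Char → Int := fun k => |D.getD k 0| with hw
  set LA := (selA ks PySem.Set.empty).map canon with hLA
  have hLAelem : ∀ d ∈ LA, d.toNat ≤ 126 ∧ canon d = d := by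
    intro d hd
    rw [hLA] at hd
    rcases (mem_selA_canon ks _ hdomk hmcEmpty d).mp hd with ⟨c, hc, _, he⟩
    have hc126 := hdomk c hc
    constructor
    · exact le_trans (he ▸ canon_toNat_le c) hc126
    · rw [← he, canon_idem hc126]
  have hA : (ks.foldl
      (fun (st : PySem.Set Char × Int) c =>
        if PySem.Set.contains st.1 c then st
        else (PySem.Set.add (PySem.Set.add st.1 c) (pyMirror c),
              st.2 + |freq.getD c 0 - freq.getD (pyMirror c) 0|))
      (PySem.Set.empty, 0)).2 = (LA.map u).sum := by
    rw [foldA_eq (fun c => |freq.getD c 0 - freq.getD (pyMirror c) 0|) ks PySem.Set.empty 0]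
    rw [hLA, List.map_map, zero_add]
    apply congrArg
    apply List.map_congr_left
    intro c hc
    have hc126 := hdomk c (selA_subset ks _ c hc)
    have hv : |freq.getD c 0 - freq.getD (pyMirror c) 0| = u c := by
      rw [hfreq, PySem.Dict.getD_counter, PySem.Dict.getD_counter, hu]
    show |freq.getD c 0 - freq.getD (pyMirror c) 0| = (u ∘ canon) c
    rw [hv]
    show u c = u (canon c)
    rcases canon_cases c with h1 | h1
    · rw [h1]
    · rw [h1, hu]
      simp only []
      rw [pyMirror_invol hc126, abs_sub_comm]
  have hkeys : D.keys = PySem.Set.ofList (l.map pvKey) := by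
    rw [hD, PySem.Dict.keys_foldl_insert_key]
    simp [PySem.Set.update_nil_left]
  have hndD : D.keys.Nodup := by rw [hkeys]; exact PySem.Set.nodup_ofList _
  have hB : (D.values.foldl (fun a v => a + |v|) 0) = ((D.keys.map w).sum) := by
    rw [PySem.List.foldl_add (g := fun v => |v|)]
    rw [PySem.Dict.values_eq_map_keys D hndD 0]
    rw [List.map_map, zero_add]
    rfl
  have hndLA : LA.Nodup := by rw [hLA]; exact nodup_selA_canon ks _ hdomk hmcEmpty
  have hginj : ∀ a ∈ LA, ∀ b ∈ LA, g a = g b → a = b := by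
    intro a _ b _ h
    exact congrArg Prod.fst h
  have hndgLA : (LA.map g).Nodup := List.Nodup.map_on hginj hndLA
  have hperm : (D.keys).Perm (LA.map g) := by
    rw [List.perm_ext_iff_of_nodup (hkeys ▸ PySem.Set.nodup_ofList _) hndgLA]
    intro k
    rw [hkeys, PySem.Set.mem_ofList]
    simp only [List.mem_map]
    constructor
    · rintro ⟨c, hc, rfl⟩
      refine ⟨canon c, ?_, ?_⟩
      · rw [hLA]
        exact (mem_selA_canon ks _ hdomk hmcEmpty (canon c)).mpr
          ⟨c, (hmem_ks c).mpr hc, List.not_mem_nil, rfl⟩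
      · rw [hg]
        exact (pvKey_eq (hdc c hc)).symm
    · rintro ⟨d, hd, rfl⟩
      have hd' := hd
      rw [hLA] at hd'
      rcases (mem_selA_canon ks _ hdomk hmcEmpty d).mp hd' with ⟨c, hc, _, he⟩
      refine ⟨c, (hmem_ks c).mp hc, ?_⟩
      rw [pvKey_eq (hdc c ((hmem_ks c).mp hc)), he, hg]
  have hpw : ∀ d ∈ LA, w (g d) = u d := by
    intro d hd
    rcases hLAelem d hd with ⟨hd126, hdcanon⟩
    rw [hw, hg]
    simp only []
    rw [hD, foldB_getD]
    rw [PySem.Dict.getD_empty, zero_add]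
    rw [sum_contrib l d hdc hd126 hdcanon]
  rw [hA, hB]
  rw [List.Perm.sum_eq (hperm.map w)]
  apply congrArg
  rw [List.map_map]
  have h2 : List.map (w ∘ g) LA = List.map u LA :=
    List.map_congr_left (fun d hd => hpw d hd)
  rw [List.map_map, h2, hLA, List.map_map]
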